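-- pv_equiv track=rewrite | github.com/allender/AdventOfCode | 2023/day14/day14.py | roll_rocks
-- ===== SOURCE A (Python) =====
-- def roll_rocks(rocks, left):
--     rolled_rocks = []
--     for r in rocks:
--         sections = r.split('#')
--         new_sections = []
--         for s in sections:
--             if left == True:
--                 new_sections.append('O' * s.count('O') + '.' * (len(s) - s.count('O')))
--             else:
--                 new_sections.append('.' * (len(s) - s.count('O')) + 'O' * s.count('O'))
--
--         rolled_rocks.append('#'.join(new_sections))
--
--     return rolled_rocks
-- ===== SOURCE B (Python) =====
-- def _flush(left, o, d):
--     if left == True: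
--         return 'O' * o + '.' * d
--     return '.' * d + 'O' * o
--
--
-- def roll_rocks(rocks, left):
--     # One pass per row: count 'O' and other chars per run, flushing at each '#'.
--     rolled_rocks = []
--     for r in rocks:
--         parts = []
--         o = d = 0
--         for c in r:
--             if c == '#':
--                 parts.append(_flush(left, o, d))
--                 parts.append('#')
--                 o = d = 0
--             elif c == 'O':
--                 o += 1
--             else:
--                 d += 1
--         parts.append(_flush(left, o, d))
--         rolled_rocks.append(''.join(parts))
--     return rolled_rocks
-- ===== Notes on version B (the rewrite author's own statement) =====
-- stated objective: simpler
-- what changed: Replaces A's split-on-'#'/count('O')/len/'#'.join per-row machinery with a single left-to-right pass per row that keeps two run counters (rocks, others) and flushes a rolled run at each '#' and at the end of the row.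
import Mathlib
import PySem

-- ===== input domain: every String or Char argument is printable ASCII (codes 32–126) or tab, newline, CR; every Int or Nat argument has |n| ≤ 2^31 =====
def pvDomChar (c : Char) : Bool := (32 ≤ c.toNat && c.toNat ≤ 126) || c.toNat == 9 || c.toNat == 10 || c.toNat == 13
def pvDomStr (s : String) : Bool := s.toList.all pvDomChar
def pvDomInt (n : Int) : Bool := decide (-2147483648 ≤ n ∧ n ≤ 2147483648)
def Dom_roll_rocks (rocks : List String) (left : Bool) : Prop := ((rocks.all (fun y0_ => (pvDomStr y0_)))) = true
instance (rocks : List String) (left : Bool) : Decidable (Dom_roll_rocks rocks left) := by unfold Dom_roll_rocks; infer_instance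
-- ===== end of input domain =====

-- B replaces A's split('#')/count/join per-row machinery by one left-to-right pass per row that
-- counts 'O' and other chars of the current run and flushes at each '#' (simpler, single pass).

-- ===== PORT A =====
-- Literal port of A. Strings handled as List Char via PySem.Chars (r.split('#') = Chars.splitOn,
-- s.count('O') = Chars.count, len(s) = Chars.len, '#'.join = Chars.join). 'X' * n for the
-- nonnegative int n = List.replicate n.toNat (exact here; Python's '' for negative n not reached).
def roll_rocks (rocks : List String) (left : Bool) : List String :=
  rocks.foldl (fun rolled_rocks r =>
    let sections := PySem.Chars.splitOn r.toList ['#']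
    let new_sections := sections.foldl (fun ns s =>
      if left == true then
        ns ++ [List.replicate (PySem.Chars.count s ['O']) 'O' ++
               List.replicate (PySem.Chars.len s - (PySem.Chars.count s ['O'] : Int)).toNat '.']
      else
        ns ++ [List.replicate (PySem.Chars.len s - (PySem.Chars.count s ['O'] : Int)).toNat '.' ++
               List.replicate (PySem.Chars.count s ['O']) 'O']) []
    rolled_rocks ++ [String.ofList (PySem.Chars.join ['#'] new_sections)]) []

-- ===== PORT B =====
-- _flush(left, o, d) of Source B
def rrFlush (left : Bool) (o d : Nat) : List Char :=
  if left == true then List.replicate o 'O' ++ List.replicate d '.'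
  else List.replicate d '.' ++ List.replicate o 'O'

-- the body of Source B's inner loop; state = (parts, o, d)
def rrStep (left : Bool) (st : List (List Char) × Nat × Nat) (c : Char) : List (List Char) × Nat × Nat :=
  if c == '#' then (st.1 ++ [rrFlush left st.2.1 st.2.2] ++ [['#']], 0, 0)
  else if c == 'O' then (st.1, st.2.1 + 1, st.2.2)
  else (st.1, st.2.1, st.2.2 + 1)

def roll_rocks_alt (rocks : List String) (left : Bool) : List String :=
  rocks.foldl (fun rolled_rocks r =>
    let st := r.toList.foldl (rrStep left) ([], 0, 0)
    rolled_rocks ++ [String.ofList (PySem.Chars.join [] (st.1 ++ [rrFlush left st.2.1 st.2.2]))]) []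

-- ===== PRECONDITION & SPEC =====
def Spec_roll_rocks (rocks : List String) (left : Bool) (out : List String) : Prop := out = roll_rocks_alt rocks left
instance (rocks : List String) (left : Bool) (out : List String) : Decidable (Spec_roll_rocks rocks left out) := by unfold Spec_roll_rocks; infer_instance

-- ===== CLAIM (what is proved, stated in full; the proofs are below) =====
def Claim_equal_roll_rocks : Prop := ∀ (rocks : List String) (left : Bool), Dom_roll_rocks rocks left → Spec_roll_rocks rocks left (roll_rocks rocks left)

-- ===== LEMMAS AND PROOFS =====

-- simple recursive characterization of splitting on the single character '#'
def pvSplit1 : List Char → List (List Char)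
  | [] => [[]]
  | c :: cs => if c = '#' then [] :: pvSplit1 cs else (pvSplit1 cs).modifyHead (c :: ·)

lemma pvSplit1_ne_nil (cs : List Char) : pvSplit1 cs ≠ [] := by
  induction cs with
  | nil => simp [pvSplit1]
  | cons c cs ih =>
    simp only [pvSplit1]
    split_ifs
    · simp
    · cases h : pvSplit1 cs with
      | nil => exact absurd h ih
      | cons a l => simp

lemma pvSplitOn_go_eq (fuel : Nat) : ∀ (l cur acc : _), l.length ≤ fuel →
    PySem.Chars.splitOn.go ['#'] fuel l cur acc
      = acc.reverse ++ (pvSplit1 l).modifyHead (cur.reverse ++ ·) := by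
  induction fuel with
  | zero =>
    intro l cur acc h
    have : l = [] := by cases l <;> simp_all
    subst this
    simp [PySem.Chars.splitOn.go, pvSplit1]
  | succ fuel ih =>
    intro l cur acc h
    cases l with
    | nil => simp [PySem.Chars.splitOn.go, pvSplit1]
    | cons c rest =>
      simp only [PySem.Chars.splitOn.go]
      by_cases hc : c = '#'
      · subst hc
        simp only [List.isPrefixOf, beq_self_eq_true, Bool.true_and, List.length_cons] at *
        rw [if_pos trivial, ih _ _ _ (by simpa using h)]
        simp only [List.drop_succ_cons, List.reverse_cons, List.append_assoc]
        simp [pvSplit1]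
        cases hs : pvSplit1 rest with
        | nil => exact absurd hs (pvSplit1_ne_nil rest)
        | cons a l => simp
      · have hp : (List.isPrefixOf ['#'] (c :: rest)) = false := by
          simp [List.isPrefixOf]; exact fun hh => absurd hh.symm hc
        simp only [hp, Bool.false_eq_true, if_false]
        rw [ih _ _ _ (by simpa using Nat.le_of_succ_le_succ (by simpa using h))]
        simp only [pvSplit1, if_neg hc]
        cases hs : pvSplit1 rest with
        | nil => exact absurd hs (pvSplit1_ne_nil rest)
        | cons a l => simp

lemma pvSplitOn_eq (cs : List Char) : PySem.Chars.splitOn cs ['#'] = pvSplit1 cs := by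
  rw [PySem.Chars.splitOn, pvSplitOn_go_eq (cs.length + 1) cs [] [] (by omega)]
  cases hs : pvSplit1 cs with
  | nil => exact absurd hs (pvSplit1_ne_nil cs)
  | cons a l => simp

lemma pvCount_go_eq (fuel : Nat) : ∀ (l : List Char) (acc : Nat), l.length ≤ fuel →
    PySem.Chars.count.go ['O'] fuel l acc = acc + l.count 'O' := by
  induction fuel with
  | zero =>
    intro l acc h
    have : l = [] := by cases l <;> simp_all
    subst this
    simp [PySem.Chars.count.go]
  | succ fuel ih =>
    intro l acc h
    cases l with
    | nil => simp [PySem.Chars.count.go]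
    | cons c rest =>
      simp only [PySem.Chars.count.go]
      by_cases hc : c = 'O'
      · subst hc
        rw [show List.isPrefixOf ['O'] ('O' :: rest) = true by simp [List.isPrefixOf]]
        simp only [if_true]
        rw [ih _ _ (by simpa using h)]
        simp
        omega
      · rw [show List.isPrefixOf ['O'] (c :: rest) = false by
          simp [List.isPrefixOf]; exact fun hh => absurd hh.symm hc]
        simp only [Bool.false_eq_true, if_false]
        rw [ih _ _ (by simpa using Nat.le_of_succ_le_succ (by simpa using h))]
        simp [hc]

lemma pvCount_eq (s : List Char) : PySem.Chars.count s ['O'] = s.count 'O' := by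
  rw [PySem.Chars.count]
  simp only [List.isEmpty_cons, Bool.false_eq_true, if_false]
  simpa using pvCount_go_eq s.length s 0 (le_refl _)

lemma pvJoin_empty (l : List (List Char)) : PySem.Chars.join [] l = l.flatten := by
  induction l with
  | nil => simp [PySem.Chars.join_nil]
  | cons a rest ih =>
    cases rest with
    | nil => simp [PySem.Chars.join_singleton]
    | cons b r => rw [PySem.Chars.join_cons_cons]; simp_all

-- A's per-section expression, after count/len normalization
def pvSec (left : Bool) (s : List Char) : List Char :=
  rrFlush left (s.count 'O') (s.length - s.count 'O')

lemma pvSec_eq (left : Bool) (s : List Char) :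
    (if left == true then
        List.replicate (PySem.Chars.count s ['O']) 'O' ++
          List.replicate (PySem.Chars.len s - (PySem.Chars.count s ['O'] : Int)).toNat '.'
      else
        List.replicate (PySem.Chars.len s - (PySem.Chars.count s ['O'] : Int)).toNat '.' ++
          List.replicate (PySem.Chars.count s ['O']) 'O') = pvSec left s := by
  have hc := pvCount_eq s
  have hle : s.count 'O' ≤ s.length := List.count_le_length
  have hn : (PySem.Chars.len s - (PySem.Chars.count s ['O'] : Int)).toNat
      = s.length - s.count 'O' := by
    rw [PySem.Chars.len_eq, hc]; omega
  rw [hn, hc, pvSec, rrFlush]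

-- A's per-row result with the pending head-section counts (o, d) made explicit
def pvARow (left : Bool) (cs : List Char) (o d : Nat) : List Char :=
  match pvSplit1 cs with
  | [] => []
  | s :: rest =>
      PySem.Chars.join ['#']
        (rrFlush left (o + s.count 'O') (d + (s.length - s.count 'O')) :: rest.map (pvSec left))

lemma pvARow_zero (left : Bool) (cs : List Char) :
    pvARow left cs 0 0 = PySem.Chars.join ['#'] ((pvSplit1 cs).map (pvSec left)) := by
  unfold pvARow
  cases hs : pvSplit1 cs with
  | nil => exact absurd hs (pvSplit1_ne_nil cs)
  | cons s rest => simp [pvSec]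

-- stepping lemmas for pvARow
lemma pvARow_hash (left : Bool) (cs : List Char) (o d : Nat) :
    pvARow left ('#' :: cs) o d = rrFlush left o d ++ '#' :: pvARow left cs 0 0 := by
  rw [pvARow_zero]
  unfold pvARow
  simp only [pvSplit1, if_true]
  cases hs : pvSplit1 cs with
  | nil => exact absurd hs (pvSplit1_ne_nil cs)
  | cons s r =>
    rw [List.map_cons, PySem.Chars.join_cons_cons]
    simp [pvSec]

lemma pvARow_O (left : Bool) (cs : List Char) (o d : Nat) :
    pvARow left ('O' :: cs) o d = pvARow left cs (o + 1) d := by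
  unfold pvARow
  simp only [pvSplit1, if_neg (by decide : ¬('O' = '#'))]
  cases hs : pvSplit1 cs with
  | nil => exact absurd hs (pvSplit1_ne_nil cs)
  | cons s r =>
    simp only [List.modifyHead_cons]
    have hle : s.count 'O' ≤ s.length := List.count_le_length
    have h1 : o + List.count 'O' ('O' :: s) = o + 1 + List.count 'O' s := by
      simp; omega
    have h2 : d + (('O' :: s).length - List.count 'O' ('O' :: s)) = d + (s.length - List.count 'O' s) := by
      simp
    rw [h1, h2]

lemma pvARow_other (left : Bool) (c : Char) (cs : List Char) (o d : Nat)
    (hc : c ≠ '#') (ho : c ≠ 'O') :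
    pvARow left (c :: cs) o d = pvARow left cs o (d + 1) := by
  unfold pvARow
  simp only [pvSplit1, if_neg hc]
  cases hs : pvSplit1 cs with
  | nil => exact absurd hs (pvSplit1_ne_nil cs)
  | cons s r =>
    simp only [List.modifyHead_cons, List.count_cons, List.length_cons]
    have hle : s.count 'O' ≤ s.length := List.count_le_length
    congr 3
    · simp [ho]
    · simp only [beq_iff_eq, if_neg ho]
      omega

-- the per-row loop invariant of B
lemma pvMain (left : Bool) : ∀ (cs : List Char) (o d : Nat) (out : List (List Char)),
    ((cs.foldl (rrStep left) (out, o, d)).1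
        ++ [rrFlush left (cs.foldl (rrStep left) (out, o, d)).2.1
                         (cs.foldl (rrStep left) (out, o, d)).2.2]).flatten
      = out.flatten ++ pvARow left cs o d := by
  intro cs
  induction cs with
  | nil =>
    intro o d out
    simp [pvARow, pvSplit1, PySem.Chars.join_singleton, rrFlush]
  | cons c rest ih =>
    intro o d out
    by_cases hc : c = '#'
    · subst hc
      rw [List.foldl_cons,
        show rrStep left (out, o, d) '#' = (out ++ [rrFlush left o d] ++ [['#']], 0, 0) from by
          simp [rrStep],
        ih 0 0 _, pvARow_hash]
      simp [List.flatten_append]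
    · by_cases ho : c = 'O'
      · subst ho
        rw [List.foldl_cons,
          show rrStep left (out, o, d) 'O' = (out, o + 1, d) from by simp [rrStep],
          ih (o + 1) d out, pvARow_O]
      · rw [List.foldl_cons,
          show rrStep left (out, o, d) c = (out, o, d + 1) from by simp [rrStep, hc, ho],
          ih o (d + 1) out, pvARow_other left c rest o d hc ho]

-- rows agree
lemma pvRow_eq (left : Bool) (r : String) :
    String.ofList (PySem.Chars.join ['#']
      ((PySem.Chars.splitOn r.toList ['#']).foldl (fun ns s =>
        if left == true then
          ns ++ [List.replicate (PySem.Chars.count s ['O']) 'O' ++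
                 List.replicate (PySem.Chars.len s - (PySem.Chars.count s ['O'] : Int)).toNat '.']
        else
          ns ++ [List.replicate (PySem.Chars.len s - (PySem.Chars.count s ['O'] : Int)).toNat '.' ++
                 List.replicate (PySem.Chars.count s ['O']) 'O']) []))
    = String.ofList (PySem.Chars.join []
        ((r.toList.foldl (rrStep left) ([], 0, 0)).1
          ++ [rrFlush left (r.toList.foldl (rrStep left) ([], 0, 0)).2.1
                           (r.toList.foldl (rrStep left) ([], 0, 0)).2.2])) := by
  have hbody : (fun (ns : List (List Char)) s =>
      if left == true then
        ns ++ [List.replicate (PySem.Chars.count s ['O']) 'O' ++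
               List.replicate (PySem.Chars.len s - (PySem.Chars.count s ['O'] : Int)).toNat '.']
      else
        ns ++ [List.replicate (PySem.Chars.len s - (PySem.Chars.count s ['O'] : Int)).toNat '.' ++
               List.replicate (PySem.Chars.count s ['O']) 'O'])
      = fun ns s => ns ++ [pvSec left s] := by
    funext ns s
    rw [← pvSec_eq left s]
    split_ifs <;> rfl
  rw [hbody, PySem.List.foldl_append_singleton_eq_map, List.nil_append, pvSplitOn_eq,
    pvJoin_empty, pvMain left r.toList 0 0 [], List.flatten_nil, List.nil_append, pvARow_zero]

-- ===== VERDICT (by name: the statement is the Claim_ definition above) =====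
theorem roll_rocks_spec : Claim_equal_roll_rocks := by
  intro rocks left hdom
  clear hdom
  unfold Spec_roll_rocks roll_rocks roll_rocks_alt
  simp only []
  induction rocks using List.reverseRecOn with
  | nil => rfl
  | append_singleton rs r ih =>
    rw [List.foldl_append, List.foldl_append, ih]
    simp only [List.foldl_cons, List.foldl_nil]
    rw [pvRow_eq left r]
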